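-- pv_equiv track=rewrite | github.com/albertovalverde/cognitive-computing | Cognitive-NAO/AudioStreaming/abcdk/stringtools.py | extractMainKeyWords
-- ===== SOURCE A (Python) =====
-- def extractMainKeyWords(aSentence):
--     """
--     aSentence is a list of words: "Hier je suis allé voir la tour Eiffel"
--     in this case we want to extract tour Eiffel
--     """
--     # Main keywords have more than 4 letters
--     if type(aSentence) == str:
--         aSentence = aSentence.split(' ')
--     nMininumNbrLetters = 3
--     aPossibleWords = [strWord for strWord in aSentence if (len(strWord) > nMininumNbrLetters)]
--
--     # for now we consider than main keywords are at the end of the string (the last 2 words)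
--     nNbrLastWords = 2
--     nNbrLastWords = min(len(aPossibleWords), nNbrLastWords)
--     aPossibleWords = aPossibleWords[-nNbrLastWords:]
-- #    print aPossibleWords
--     return aPossibleWords
-- ===== SOURCE B (Python) =====
-- def extractMainKeyWords(aSentence):
--     if type(aSentence) == str:
--         aSentence = aSentence.split(' ')
--     result = []
--     for strWord in reversed(aSentence):
--         if len(strWord) > 3:
--             result.append(strWord)
--             if len(result) == 2:
--                 break
--     result.reverse()
--     return result
-- ===== Notes on version B (the rewrite author's own statement) =====
-- stated objective: faster
-- what changed: Replaces A's full filtering pass plus negative-slice tail with a single backward scan that stops as soon as two long words are found, then reverses the collected pair.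
import Mathlib
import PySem

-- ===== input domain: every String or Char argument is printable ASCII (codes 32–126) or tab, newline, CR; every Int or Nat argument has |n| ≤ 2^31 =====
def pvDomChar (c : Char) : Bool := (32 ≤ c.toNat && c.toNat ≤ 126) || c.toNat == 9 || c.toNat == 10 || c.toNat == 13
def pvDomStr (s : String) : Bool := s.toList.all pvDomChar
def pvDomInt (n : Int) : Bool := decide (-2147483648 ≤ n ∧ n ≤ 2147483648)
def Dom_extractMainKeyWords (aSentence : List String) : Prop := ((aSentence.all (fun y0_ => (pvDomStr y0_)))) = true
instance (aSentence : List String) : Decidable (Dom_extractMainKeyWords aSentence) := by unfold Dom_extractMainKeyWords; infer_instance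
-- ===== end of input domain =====

-- B replaces A's full filtering pass + negative-slice tail with a backward scan that
-- stops once two long words are collected, then reverses them (alternative decomposition).


-- ===== PORT A =====
-- (the 'type(aSentence) == str' branch never fires: the argument is a list of words)
def extractMainKeyWords (aSentence : List String) : List String :=
  let aPossibleWords := aSentence.filter (fun strWord => 3 < PySem.Str.len strWord)
  let nNbrLastWords := min (PySem.List.len aPossibleWords) 2
  PySem.List.slice aPossibleWords (some (-nNbrLastWords)) none

-- ===== PORT B =====
-- the 'for strWord in reversed(aSentence)' loop with `result`, append and break
def extractMainKeyWordsGo (result : List String) : List String → List String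
  | [] => result
  | strWord :: rest =>
    if 3 < PySem.Str.len strWord then
      let result' := result ++ [strWord]
      if result'.length = 2 then result' else extractMainKeyWordsGo result' rest
    else extractMainKeyWordsGo result rest

def extractMainKeyWords_alt (aSentence : List String) : List String :=
  (extractMainKeyWordsGo [] aSentence.reverse).reverse

-- ===== PRECONDITION & SPEC =====
def Spec_extractMainKeyWords (aSentence : List String) (out : List String) : Prop := out = extractMainKeyWords_alt aSentence
instance (aSentence : List String) (out : List String) : Decidable (Spec_extractMainKeyWords aSentence out) := by unfold Spec_extractMainKeyWords; infer_instance

-- ===== CLAIM (what is proved, stated in full; the proofs are below) =====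
def Claim_equal_extractMainKeyWords : Prop := ∀ (aSentence : List String), Dom_extractMainKeyWords aSentence → Spec_extractMainKeyWords aSentence (extractMainKeyWords aSentence)

-- ===== LEMMAS AND PROOFS =====

-- B's loop collects the first (up to 2 - |acc|) matching words of its input, in order.
theorem extractMainKeyWordsGo_eq (ys : List String) : ∀ (acc : List String), acc.length < 2 →
    extractMainKeyWordsGo acc ys =
      acc ++ ((ys.filter (fun w => 3 < PySem.Str.len w)).take (2 - acc.length)) := by
  induction ys with
  | nil => intro acc _; simp only [extractMainKeyWordsGo, List.filter_nil, List.take_nil,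
      List.append_nil]
  | cons w rest ih =>
    intro acc hacc
    rw [show extractMainKeyWordsGo acc (w :: rest) =
        (if 3 < PySem.Str.len w then
          (if (acc ++ [w]).length = 2 then acc ++ [w]
           else extractMainKeyWordsGo (acc ++ [w]) rest)
         else extractMainKeyWordsGo acc rest) from rfl,
      List.filter_cons]
    split_ifs with hp hlen hf hf hf
    · have h1 : acc.length = 1 := by
        have h' : acc.length + 1 = 2 := by simpa using hlen
        omega
      rw [h1]
      simp
    · exact absurd (decide_eq_true hp) hf
    · have h0 : acc.length = 0 := by
        have h' : acc.length + 1 ≠ 2 := by simpa using hlen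
        omega
      have hnil : acc = [] := List.eq_nil_of_length_eq_zero h0
      subst hnil
      rw [show ([] ++ [w] : List String) = [w] from rfl, ih [w] (by simp)]
      simp
    · exact absurd (decide_eq_true hp) hf
    · exact absurd (of_decide_eq_true hf) hp
    · exact ih acc hacc

theorem clampIdx_tail (L : Nat) : PySem.List.clampIdx L (-(min (L:Int) 2)) = L - 2 := by
  unfold PySem.List.clampIdx; split_ifs <;> omega

-- ===== VERDICT (by name: the statement is the Claim_ definition above) =====
theorem extractMainKeyWords_spec : Claim_equal_extractMainKeyWords := by
  intro aSentence _
  unfold Spec_extractMainKeyWords extractMainKeyWords extractMainKeyWords_alt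
  rw [extractMainKeyWordsGo_eq _ [] (by simp)]
  simp only [List.nil_append, List.length_nil, Nat.sub_zero]
  rw [List.filter_reverse, List.take_reverse, List.reverse_reverse,
    PySem.List.slice_some_none]
  simp only [PySem.List.len, clampIdx_tail]
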